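-- pv_equiv track=rewrite | github.com/fukubaya/python-img2xls | img2xls/__init__.py | get_rgblist_from_palette
-- ===== SOURCE A (Python) =====
-- def get_rgblist_from_palette(palette):
--     rgblist = []
--
--     tmprgb = [None]*3
--     i=0
--     for c in palette:
--         tmprgb[i] = c
--         i+=1
--         if i == 3:
--             rgblist.append((tmprgb[0],tmprgb[1],tmprgb[2]))
--             i = 0
--             tmprgb = [None]*3
--
--     return rgblist
-- ===== SOURCE B (Python) =====
-- def get_rgblist_from_palette(palette):
--     it = iter(palette)
--     return list(zip(it, it, it))
-- ===== Notes on version B (the rewrite author's own statement) =====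
-- stated objective: idiomatic
-- what changed: Replaced A's index-counter loop with a mutable 3-slot buffer by the standard iterator-grouper idiom list(zip(it, it, it)), which pulls three elements per tuple from one shared iterator and drops any trailing partial group with no counter, buffer or branch.
import Mathlib
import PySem

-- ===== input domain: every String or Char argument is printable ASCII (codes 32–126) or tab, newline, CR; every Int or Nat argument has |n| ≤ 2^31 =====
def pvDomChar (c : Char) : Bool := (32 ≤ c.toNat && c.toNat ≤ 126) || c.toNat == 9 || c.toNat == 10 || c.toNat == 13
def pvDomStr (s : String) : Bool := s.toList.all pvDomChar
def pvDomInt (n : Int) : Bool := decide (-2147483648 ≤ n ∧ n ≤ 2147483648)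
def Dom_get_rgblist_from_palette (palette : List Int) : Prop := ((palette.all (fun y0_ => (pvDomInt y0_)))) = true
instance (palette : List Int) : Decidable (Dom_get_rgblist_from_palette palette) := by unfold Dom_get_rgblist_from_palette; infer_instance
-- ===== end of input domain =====

-- B replaces A's counter+buffer loop with the iterator-grouper idiom (zip of one iterator thrice), for idiomatic simplicity; same O(n) cost.


-- ===== PORT A =====
-- A's loop step: state (rgblist, tmprgb, i); tmprgb[i] = c; i += 1; emit when i == 3
def pvStepA (st : List (Int × Int × Int) × List (Option Int) × Nat) (c : Int) :
    List (Int × Int × Int) × List (Option Int) × Nat :=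
  let (rgblist, tmprgb, i) := st
  let tmprgb := tmprgb.set i (some c)
  let i := i + 1
  if i = 3 then
    (rgblist ++ [(((tmprgb.getD 0 none).getD 0), ((tmprgb.getD 1 none).getD 0), ((tmprgb.getD 2 none).getD 0))],
     [none, none, none], 0)
  else
    (rgblist, tmprgb, i)

def get_rgblist_from_palette (palette : List Int) : List (Int × Int × Int) :=
  (palette.foldl pvStepA ([], [none, none, none], 0)).1

-- ===== PORT B =====
-- B groups the flat list three at a time (Python: one iterator zipped with itself thrice);
-- the port is the corresponding structural recursion taking three elements per step.
def get_rgblist_from_palette_alt (palette : List Int) : List (Int × Int × Int) :=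
  match palette with
  | a :: b :: c :: rest => (a, b, c) :: get_rgblist_from_palette_alt rest
  | _ => []

-- ===== PRECONDITION & SPEC =====
def Spec_get_rgblist_from_palette (palette : List Int) (out : List (Int × Int × Int)) : Prop := out = get_rgblist_from_palette_alt palette
instance (palette : List Int) (out : List (Int × Int × Int)) : Decidable (Spec_get_rgblist_from_palette palette out) := by unfold Spec_get_rgblist_from_palette; infer_instance

-- ===== CLAIM (what is proved, stated in full; the proofs are below) =====
def Claim_equal_get_rgblist_from_palette : Prop := ∀ (palette : List Int), Dom_get_rgblist_from_palette palette → Spec_get_rgblist_from_palette palette (get_rgblist_from_palette palette)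

-- ===== LEMMAS AND PROOFS =====

lemma pvFoldA (palette : List Int) : ∀ (acc : List (Int × Int × Int)),
    (palette.foldl pvStepA (acc, [none, none, none], 0)).1
      = acc ++ get_rgblist_from_palette_alt palette := by
  induction palette using get_rgblist_from_palette_alt.induct with
  | case1 a b c rest ih =>
      intro acc
      simp [List.foldl, pvStepA, get_rgblist_from_palette_alt, ih (acc ++ [(a, b, c)])]
  | case2 l h1 =>
      intro acc
      match l, h1 with
      | [], _ => simp [get_rgblist_from_palette_alt]
      | [a], _ => simp [List.foldl, pvStepA, get_rgblist_from_palette_alt]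
      | [a, b], _ => simp [List.foldl, pvStepA, get_rgblist_from_palette_alt]
      | a :: b :: c :: r, h => exact absurd rfl (h a b c r)

-- ===== VERDICT (by name: the statement is the Claim_ definition above) =====
theorem get_rgblist_from_palette_spec : Claim_equal_get_rgblist_from_palette := by
  intro palette _
  unfold Spec_get_rgblist_from_palette get_rgblist_from_palette
  simp [pvFoldA palette []]
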